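-- pv_equiv track=rewrite | github.com/markmn123/Cell-Assembler | CellAssembler-1.1.py | assemble_battery_pack
-- ===== SOURCE A (Python) =====
-- def assemble_battery_pack(capacities, num_series, num_parallel):
--     if num_series * num_parallel > len(capacities):
--         return None
--
--     capacities.sort(reverse=True)
--     battery_pack = [[] for _ in range(num_series)]
--
--     for _ in range(num_parallel):
--         for s in battery_pack:
--             if capacities:
--                 s.append(capacities.pop(0))
--             else:
--                 break
--
--     return battery_pack
-- ===== SOURCE B (Python) =====
-- def assemble_battery_pack(capacities, num_series, num_parallel):
--     # Direct indexed construction: after a descending sort, round-robin order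
--     # puts the p-th cell of series s at flat position p*num_series + s, so each
--     # series can be read off directly instead of popping cells one by one.
--     # Sorts capacities in place but does not remove the used cells from it.
--     if num_series * num_parallel > len(capacities):
--         return None
--     capacities.sort(reverse=True)
--     return [[capacities[p * num_series + s] for p in range(num_parallel)]
--             for s in range(num_series)]
-- ===== Notes on version B (the rewrite author's own statement) =====
-- stated objective: alternative
-- what changed: Replaces A's nested round-robin fill that repeatedly pops the front of the list with direct indexed construction: the p-th cell of series s is read at flat position p*num_series+s after the descending sort (return-value equivalence; B sorts in place like A but does not remove the used cells from the list).
import Mathlib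
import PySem

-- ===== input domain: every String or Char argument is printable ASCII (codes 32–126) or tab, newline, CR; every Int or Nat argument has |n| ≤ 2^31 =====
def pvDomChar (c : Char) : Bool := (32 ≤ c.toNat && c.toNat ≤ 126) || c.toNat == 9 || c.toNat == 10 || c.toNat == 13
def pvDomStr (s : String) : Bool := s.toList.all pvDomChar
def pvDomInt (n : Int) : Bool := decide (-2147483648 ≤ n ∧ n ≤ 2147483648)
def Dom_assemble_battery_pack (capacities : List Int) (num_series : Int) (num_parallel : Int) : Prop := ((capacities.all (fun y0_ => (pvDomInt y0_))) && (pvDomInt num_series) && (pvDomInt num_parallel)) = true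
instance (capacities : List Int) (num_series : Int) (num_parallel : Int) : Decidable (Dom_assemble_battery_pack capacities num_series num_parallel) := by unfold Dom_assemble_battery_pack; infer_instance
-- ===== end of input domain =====

-- B replaces A's nested round-robin fill (which repeatedly pops the front of the list)
-- with direct indexed construction: the p-th cell of series s is capacities[p*num_series+s]
-- after the descending sort.  Equivalence proved here is about the RETURN value; both
-- Pythons sort `capacities` in place, but A additionally removes the used cells while B
-- leaves the sorted list intact.

-- ===== PORT A =====
-- inner loop: 'for s in battery_pack: if capacities: s.append(capacities.pop(0)) else: break'
def packRound (caps : List Int) (pack : List (List Int)) : List Int × List (List Int) :=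
  match pack with
  | [] => (caps, [])
  | s :: rest =>
    match caps with
    | [] => ([], s :: rest)          -- break: remaining rows untouched
    | c :: cs =>
      let r := packRound cs rest
      (r.1, (s ++ [c]) :: r.2)

def assemble_battery_pack (capacities : List Int) (num_series : Int) (num_parallel : Int) : Option (List (List Int)) :=
  if num_series * num_parallel > (capacities.length : Int) then none
  else
    let caps := PySem.List.sorted capacities (fun x => x) true
    let pack := (PySem.List.pyRange 0 num_series 1).map (fun _ => ([] : List Int))
    let st := (PySem.List.pyRange 0 num_parallel 1).foldl (fun st _ => packRound st.1 st.2) (caps, pack)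
    some st.2

-- ===== PORT B =====
def assemble_battery_pack_alt (capacities : List Int) (num_series : Int) (num_parallel : Int) : Option (List (List Int)) :=
  if num_series * num_parallel > (capacities.length : Int) then none
  else
    let caps := PySem.List.sorted capacities (fun x => x) true
    -- the index p*num_series+s is always in range under the guard, so pyGet? is never none
    some ((PySem.List.pyRange 0 num_series 1).map (fun s =>
      (PySem.List.pyRange 0 num_parallel 1).map (fun p =>
        (PySem.List.pyGet? caps (p * num_series + s)).getD 0)))

-- ===== PRECONDITION & SPEC =====
def Spec_assemble_battery_pack (capacities : List Int) (num_series : Int) (num_parallel : Int) (out : Option (List (List Int))) : Prop := out = assemble_battery_pack_alt capacities num_series num_parallel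
instance (capacities : List Int) (num_series : Int) (num_parallel : Int) (out : Option (List (List Int))) : Decidable (Spec_assemble_battery_pack capacities num_series num_parallel out) := by unfold Spec_assemble_battery_pack; infer_instance

-- ===== CLAIM (what is proved, stated in full; the proofs are below) =====
def Claim_equal_assemble_battery_pack : Prop := ∀ (capacities : List Int) (num_series : Int) (num_parallel : Int), Dom_assemble_battery_pack capacities num_series num_parallel → Spec_assemble_battery_pack capacities num_series num_parallel (assemble_battery_pack capacities num_series num_parallel)

-- ===== LEMMAS AND PROOFS =====

-- rows of the pack after n full round-robin rounds over caps with k rows: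
-- row s collects caps[0*k+s], caps[1*k+s], …, caps[(n-1)*k+s]
def strip (caps : List Int) (k n : Nat) : List (List Int) :=
  (List.range k).map (fun s => (List.range n).map (fun p => caps.getD (p * k + s) 0))

theorem foldl_ignore_iterate {α β : Type} (l : List β) (g : α → α) (st : α) :
    l.foldl (fun st _ => g st) st = g^[l.length] st := by
  induction l generalizing st with
  | nil => rfl
  | cons x xs ih => simp [List.foldl_cons, ih, Function.iterate_succ_apply]

theorem packRound_spec (pack : List (List Int)) (caps : List Int)
    (h : pack.length ≤ caps.length) :
    packRound caps pack = (caps.drop pack.length, List.zipWith (fun r c => r ++ [c]) pack caps) := by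
  induction pack generalizing caps with
  | nil => simp [packRound]
  | cons s rest ih =>
    cases caps with
    | nil => simp at h
    | cons c cs =>
      simp only [List.length_cons, Nat.add_le_add_iff_right] at h
      simp [packRound, ih cs h]

theorem zipWith_append_nil_right (xs : List (List Int)) (k : Nat) (h : xs.length ≤ k) :
    List.zipWith (· ++ ·) xs (List.replicate k ([] : List Int)) = xs := by
  induction xs generalizing k with
  | nil => simp
  | cons x t ih =>
    cases k with
    | zero => simp at h
    | succ m => simp [List.replicate_succ, ih m (by simpa using h)]

theorem zipWith_append_nil_left (ys : List (List Int)) (k : Nat) (h : ys.length ≤ k) :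
    List.zipWith (· ++ ·) (List.replicate k ([] : List Int)) ys = ys := by
  induction ys generalizing k with
  | nil => simp
  | cons y t ih =>
    cases k with
    | zero => simp at h
    | succ m => simp [List.replicate_succ, ih m (by simpa using h)]

theorem zipWith_snoc_cons' (xs : List (List Int)) (cs : List Int) (ss : List (List Int))
    (h1 : xs.length = cs.length) (h2 : cs.length = ss.length) :
    List.zipWith (· ++ ·) (List.zipWith (fun r c => r ++ [c]) xs cs) ss
      = List.zipWith (· ++ ·) xs (List.zipWith (fun c s => c :: s) cs ss) := by
  induction xs generalizing cs ss with
  | nil => cases cs <;> cases ss <;> simp_all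
  | cons x xs ih =>
    cases cs with
    | nil => simp at h1
    | cons c cs =>
      cases ss with
      | nil => simp at h2
      | cons s ss =>
        simp only [List.zipWith_cons_cons, List.cons.injEq]
        exact ⟨by simp, ih cs ss (by simpa using h1) (by simpa using h2)⟩

theorem zipWith_trunc (xs : List (List Int)) (cs : List Int) (h : xs.length ≤ cs.length) :
    List.zipWith (fun r c => r ++ [c]) xs cs
      = List.zipWith (fun r c => r ++ [c]) xs (cs.take xs.length) := by
  induction xs generalizing cs with
  | nil => simp
  | cons x t ih =>
    cases cs with
    | nil => simp at h
    | cons c cs' => simp [List.take_succ_cons, ih cs' (by simpa using h)]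

theorem strip_succ (caps : List Int) (k n : Nat) (hlen : k ≤ caps.length) :
    strip caps k (n + 1)
      = List.zipWith (fun c s => c :: s) (caps.take k) (strip (caps.drop k) k n) := by
  apply List.ext_getElem
  · simp [strip, Nat.min_eq_left hlen]
  · intro i h1 h2
    simp only [strip, List.getElem_map, List.getElem_range, List.getElem_zipWith,
      List.getElem_take]
    simp only [strip, List.length_map, List.length_range] at h1
    rw [List.range_succ_eq_map]
    simp only [List.map_cons, List.map_map]
    congr 1
    · rw [List.getD_eq_getElem caps 0 (by omega)]
      simp
    · apply List.map_congr_left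
      intro p hp
      simp only [Function.comp]
      rw [List.getD_eq_getElem?_getD, List.getD_eq_getElem?_getD, List.getElem?_drop,
        show k + (p * k + i) = p.succ * k + i by rw [Nat.succ_mul]; ring]

theorem iterate_spec (k : Nat) (n : Nat) (caps : List Int) (pack : List (List Int))
    (hp : pack.length = k) (hlen : k * n ≤ caps.length) :
    (fun st : List Int × List (List Int) => packRound st.1 st.2)^[n] (caps, pack)
      = (caps.drop (k * n), List.zipWith (· ++ ·) pack (strip caps k n)) := by
  induction n generalizing caps pack with
  | zero =>
    simp only [Function.iterate_zero, id_eq, Nat.mul_zero, List.drop_zero]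
    rw [strip]
    simp only [List.range_zero, List.map_nil, List.map_const', List.length_range]
    rw [zipWith_append_nil_right pack k (by omega)]
  | succ n ih =>
    by_cases hk : k = 0
    · subst hk
      simp only [List.length_eq_zero_iff] at hp
      subst hp
      have hstep : ∀ c : List Int,
          (fun st : List Int × List (List Int) => packRound st.1 st.2) (c, []) = (c, []) := by
        intro c; simp [packRound]
      rw [Function.iterate_fixed (hstep caps)]
      simp [strip]
    have hkpos : 0 < k := Nat.pos_of_ne_zero hk
    have hk1 : k ≤ caps.length := le_trans (by nlinarith) hlen
    rw [Function.iterate_succ_apply]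
    simp only
    rw [packRound_spec pack caps (by omega), hp]
    rw [ih (caps.drop k) _ (by rw [List.length_zipWith]; omega)
      (by rw [List.length_drop]; have := hlen; rw [Nat.mul_succ] at this; omega)]
    rw [Prod.mk.injEq]
    refine ⟨?_, ?_⟩
    · rw [List.drop_drop]
      congr 1
      rw [Nat.mul_succ]; omega
    · rw [zipWith_trunc pack caps (by omega), hp,
        zipWith_snoc_cons' pack (caps.take k) _ (by simp; omega) (by simp [strip]; omega),
        ← strip_succ caps k n hk1]

theorem main_spec (capacities : List Int) (num_series num_parallel : Int) :
    assemble_battery_pack capacities num_series num_parallel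
      = assemble_battery_pack_alt capacities num_series num_parallel := by
  by_cases hg : num_series * num_parallel > (capacities.length : Int)
  · simp [assemble_battery_pack, assemble_battery_pack_alt, hg]
  · simp only [assemble_battery_pack, assemble_battery_pack_alt, if_neg hg]
    set caps := PySem.List.sorted capacities (fun x => x) true with hcaps
    have hclen : caps.length = capacities.length := PySem.List.length_sorted ..
    set k := num_series.toNat with hk
    set n := num_parallel.toNat with hn
    have hplen : ((PySem.List.pyRange 0 num_series 1).map (fun _ => ([] : List Int))).length = k := by
      simp only [List.length_map, PySem.List.length_pyRange_one]; omega
    have hlen : k * n ≤ caps.length := by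
      rw [hclen]
      by_cases h1 : num_series ≤ 0
      · have : k = 0 := by omega
        simp [this]
      · by_cases h2 : num_parallel ≤ 0
        · have : n = 0 := by omega
          simp [this]
        · have hcast : ((k * n : Nat) : Int) = num_series * num_parallel := by
            push_cast; rw [Int.toNat_of_nonneg (by omega), Int.toNat_of_nonneg (by omega)]
          have := not_lt.mp hg
          exact_mod_cast hcast ▸ this
    rw [foldl_ignore_iterate, PySem.List.length_pyRange_one]
    have hnp : (num_parallel - 0).toNat = n := by omega
    rw [hnp, iterate_spec k n caps _ hplen hlen]
    simp only
    congr 1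
    have hpack : ((PySem.List.pyRange 0 num_series 1).map (fun _ => ([] : List Int)))
        = List.replicate k ([] : List Int) := by
      rw [List.map_const']
      congr 1
      rw [PySem.List.length_pyRange_one]
      omega
    rw [hpack, zipWith_append_nil_left _ k (by simp [strip])]
    rw [PySem.List.pyRange_one 0 num_series, List.map_map, strip]
    have hkk : (num_series - 0).toNat = k := by omega
    rw [hkk]
    apply List.map_congr_left
    intro s hs
    simp only [List.mem_range] at hs
    simp only [Function.comp, zero_add]
    rw [PySem.List.pyRange_one 0 num_parallel, List.map_map, hnp]
    apply List.map_congr_left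
    intro p hp
    simp only [List.mem_range] at hp
    simp only [Function.comp, zero_add]
    have hkns : (k : Int) = num_series := by omega
    have hidx : (p : Int) * num_series + (s : Int) = ((p * k + s : Nat) : Int) := by
      rw [← hkns]; push_cast; ring
    have hr : p * k + s < caps.length := by
      have : 0 < k := by omega
      nlinarith
    rw [hidx, PySem.List.pyGet?_natCast, List.getD_eq_getElem caps 0 hr]
    simp [List.getElem?_eq_getElem hr]

-- ===== VERDICT (by name: the statement is the Claim_ definition above) =====
theorem assemble_battery_pack_spec : Claim_equal_assemble_battery_pack := by
  intro capacities num_series num_parallel _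
  exact main_spec capacities num_series num_parallel
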